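-- pv_equiv track=rewrite | github.com/spark159/condense-seq | prepro_scripts/old/make_profile.py | NN_interpolate
-- ===== SOURCE A (Python) =====
-- import math
-- import copy
--
-- def NN_interpolate (raw_data_list):
--     data_list = copy.deepcopy(raw_data_list)
--     has_data = False
--     # handle first one
--     for i in range(len(data_list)):
--         if data_list[i] != 'NA':
--             data_list[:i] = [data_list[i]]*i
--             has_data = True
--             break
--     # no data
--     if not has_data:
--         return data_list
--     # handle extra
--     while i < len(data_list)-1:
--         j = i + 1
--         while j < len(data_list)-1:
--             if data_list[j] != 'NA':
--                 break
--             j += 1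
--         mid = int(math.ceil((i+j)/2.0))
--         #print i, mid, j
--         data_list[i+1:mid] = [data_list[i]]*(mid-i-1)
--         if data_list[j] != 'NA':
--             data_list[mid:j] = [data_list[j]]*(j-mid)
--         else:
--             data_list[mid:j+1] = [data_list[i]]*(j-mid+1)
--         i = j
--     return data_list
-- ===== SOURCE B (Python) =====
-- def NN_interpolate(raw_data_list):
--     # Two linear passes recording the nearest non-'NA' neighbor on each side,
--     # then a combine pass: strict tie-break to the right neighbor. No mutation.
--     xs = list(raw_data_list)
--     left = []
--     st = None
--     for v in xs:
--         if v != 'NA':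
--             st = (v, 0)
--         elif st is not None:
--             st = (st[0], st[1] + 1)
--         left.append(st)
--     right_rev = []
--     st = None
--     for v in reversed(xs):
--         if v != 'NA':
--             st = (v, 0)
--         elif st is not None:
--             st = (st[0], st[1] + 1)
--         right_rev.append(st)
--     right = right_rev[::-1]
--     out = []
--     for v, l, r in zip(xs, left, right):
--         if v != 'NA':
--             out.append(v)
--         elif l is None and r is None:
--             out.append(v)
--         elif r is None:
--             out.append(l[0])
--         elif l is None:
--             out.append(r[0])
--         elif l[1] < r[1]:
--             out.append(l[0])
--         else:
--             out.append(r[0])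
--     return out
-- ===== Notes on version B (the rewrite author's own statement) =====
-- stated objective: simpler
-- what changed: Replaces A's in-place slice-splicing loop with ceil-midpoint arithmetic by two non-mutating linear passes (nearest non-'NA' neighbor and distance from the left, then from the right) and a combine pass that picks the left value only when strictly closer, ties going right.
import Mathlib
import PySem

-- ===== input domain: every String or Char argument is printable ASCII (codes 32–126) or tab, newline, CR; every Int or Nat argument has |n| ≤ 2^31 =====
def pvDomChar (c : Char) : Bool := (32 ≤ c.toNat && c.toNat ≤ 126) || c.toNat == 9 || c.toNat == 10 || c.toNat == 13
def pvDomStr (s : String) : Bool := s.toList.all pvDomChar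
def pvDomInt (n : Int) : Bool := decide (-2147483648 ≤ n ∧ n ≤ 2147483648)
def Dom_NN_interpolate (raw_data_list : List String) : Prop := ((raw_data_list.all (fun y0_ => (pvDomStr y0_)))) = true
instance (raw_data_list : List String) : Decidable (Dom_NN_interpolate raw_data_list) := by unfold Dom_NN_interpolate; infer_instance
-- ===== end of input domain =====

-- B replaces A's in-place slice-splicing loop with two non-mutating nearest-neighbor
-- passes and a combine pass (objective: simpler); return values proved equal on all inputs.

-- ===== PORT A =====

-- data_list[a:b] = [v]*(b-a)  (slice assignment of a constant, equal length)
def pvSetSeg (xs : List String) (a b : Nat) (v : String) : List String :=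
  xs.mapIdx (fun k x => if a ≤ k ∧ k < b then v else x)

theorem pvSetSeg_length (xs : List String) (a b : Nat) (v : String) :
    (pvSetSeg xs a b v).length = xs.length := by
  simp [pvSetSeg]

-- the inner `while j < len-1: if data[j] != 'NA': break; j += 1`
def pvInnerJ (data : List String) (j : Nat) : Nat :=
  if j < data.length - 1 then
    if data.getD j "" ≠ "NA" then j else pvInnerJ data (j + 1)
  else j
termination_by data.length - j
decreasing_by omega

theorem pvInnerJ_ge (data : List String) (j : Nat) : j ≤ pvInnerJ data j := by
  fun_induction pvInnerJ data j <;> omega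

-- the outer `while i < len(data_list)-1: …`
def pvLoopA (data : List String) (i : Nat) : List String :=
  if i < data.length - 1 then
    let j := pvInnerJ data (i + 1)
    let mid := (i + j + 1) / 2          -- int(math.ceil((i+j)/2.0)) : exact for these sizes
    let d1 := pvSetSeg data (i + 1) mid (data.getD i "")
    if d1.getD j "" ≠ "NA" then
      pvLoopA (pvSetSeg d1 mid j (d1.getD j "")) j
    else
      pvLoopA (pvSetSeg d1 mid (j + 1) (d1.getD i "")) j
  else data
termination_by data.length - i
decreasing_by
  · have := pvInnerJ_ge data (i + 1); simp only [pvSetSeg_length]; omega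
  · have := pvInnerJ_ge data (i + 1); simp only [pvSetSeg_length]; omega

def NN_interpolate (raw_data_list : List String) : List String :=
  -- data_list = copy.deepcopy(raw_data_list); find first non-'NA' (the `for … break` loop)
  match raw_data_list.findIdx? (fun s => s != "NA") with
  | none => raw_data_list                                   -- not has_data
  | some i => pvLoopA (pvSetSeg raw_data_list 0 i (raw_data_list.getD i "")) i

-- ===== PORT B =====

-- one directional pass: state = nearest previous non-'NA' value with its distance
def pvScan : List String → Option (String × Nat) → List (Option (String × Nat))
  | [], _ => []
  | v :: rest, st =>
    let st' := if v ≠ "NA" then some (v, 0)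
               else match st with
                    | none => none
                    | some l => some (l.1, l.2 + 1)
    st' :: pvScan rest st'

def NN_interpolate_alt (raw_data_list : List String) : List String :=
  let left := pvScan raw_data_list none
  let right := (pvScan raw_data_list.reverse none).reverse
  (raw_data_list.zip (left.zip right)).map (fun vlr =>
    let v := vlr.1
    if v ≠ "NA" then v
    else match vlr.2.1, vlr.2.2 with
    | none, none => v
    | some l, none => l.1
    | none, some r => r.1
    | some l, some r => if l.2 < r.2 then l.1 else r.1)

-- ===== PRECONDITION & SPEC =====
def Spec_NN_interpolate (raw_data_list : List String) (out : List String) : Prop := out = NN_interpolate_alt raw_data_list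
instance (raw_data_list : List String) (out : List String) : Decidable (Spec_NN_interpolate raw_data_list out) := by unfold Spec_NN_interpolate; infer_instance

-- ===== CLAIM (what is proved, stated in full; the proofs are below) =====
def Claim_equal_NN_interpolate : Prop := ∀ (raw_data_list : List String), Dom_NN_interpolate raw_data_list → Spec_NN_interpolate raw_data_list (NN_interpolate raw_data_list)

-- ===== LEMMAS AND PROOFS =====

-- nearest non-'NA' at or before p / at or after p, with distance
def pvNL (xs : List String) (p : Nat) : Option (String × Nat) :=
  (pvScan xs none).getD p none

def pvNR (xs : List String) (p : Nat) : Option (String × Nat) :=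
  (pvScan xs.reverse none).getD (xs.length - 1 - p) none

-- the common pointwise specification both programs compute
def pvSpec (xs : List String) (p : Nat) : String :=
  if xs.getD p "" ≠ "NA" then xs.getD p ""
  else match pvNL xs p, pvNR xs p with
  | none, none => xs.getD p ""
  | some l, none => l.1
  | none, some r => r.1
  | some l, some r => if l.2 < r.2 then l.1 else r.1

def pvSpecList (xs : List String) : List String :=
  (List.range xs.length).map (pvSpec xs)

theorem pvScan_length (xs : List String) (st : Option (String × Nat)) :
    (pvScan xs st).length = xs.length := by
  induction xs generalizing st with
  | nil => rfl
  | cons v rest ih => simp [pvScan, ih]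

-- characterization when everything up to p is 'NA'
theorem pvScan_getD_allNA (xs : List String) (st : Option (String × Nat)) (p : Nat)
    (hp : p < xs.length) (hNA : ∀ k, k ≤ p → xs.getD k "" = "NA") :
    (pvScan xs st).getD p none =
      (match st with | none => none | some l => some (l.1, l.2 + p + 1)) := by
  induction xs generalizing st p with
  | nil => simp at hp
  | cons v rest ih =>
    have hv : v = "NA" := by simpa using hNA 0 (Nat.zero_le _)
    subst hv
    cases p with
    | zero => cases st <;> simp [pvScan]
    | succ p =>
      have hp' : p < rest.length := by simpa using hp
      have hNA' : ∀ k, k ≤ p → rest.getD k "" = "NA" := fun k hk => by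
        simpa using hNA (k + 1) (by omega)
      cases st with
      | none => simpa [pvScan] using ih none p hp' hNA'
      | some l =>
        have h2 := ih (some (l.1, l.2 + 1)) p hp' hNA'
        simp [pvScan] at h2 ⊢
        rw [h2]
        exact congrArg some (Prod.ext rfl (by omega))

-- characterization when i is the last non-'NA' index at or before p
theorem pvScan_getD_last (xs : List String) (st : Option (String × Nat)) (p i : Nat)
    (hp : p < xs.length) (hip : i ≤ p) (hi : xs.getD i "" ≠ "NA")
    (hNA : ∀ k, i < k → k ≤ p → xs.getD k "" = "NA") :
    (pvScan xs st).getD p none = some (xs.getD i "", p - i) := by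
  induction xs generalizing st p i with
  | nil => simp at hp
  | cons v rest ih =>
    cases p with
    | zero =>
      interval_cases i
      simp only [List.getD_cons_zero] at hi ⊢
      simp [pvScan, hi]
    | succ p =>
      have hp' : p < rest.length := by simpa using hp
      cases i with
      | zero =>
        simp only [List.getD_cons_zero] at hi ⊢
        have hNA' : ∀ k, k ≤ p → rest.getD k "" = "NA" := fun k hk => by
          simpa using hNA (k + 1) (by omega) (by omega)
        have h2 := pvScan_getD_allNA rest
          (if v ≠ "NA" then some (v, 0)
           else match st with | none => none | some l => some (l.1, l.2 + 1))
          p hp' hNA'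
        simp [pvScan, hi] at h2 ⊢
        rw [h2]
      | succ i =>
        have h2 := ih (if v ≠ "NA" then some (v, 0)
           else match st with | none => none | some l => some (l.1, l.2 + 1))
          p i hp' (by omega) (by simpa using hi)
          (fun k h1 h2 => by simpa using hNA (k + 1) (by omega) (by omega))
        simp [pvScan] at h2 ⊢
        rw [h2]

theorem getD_reverse {α : Type} (xs : List α) (d : α) (k : Nat) (hk : k < xs.length) :
    xs.reverse.getD k d = xs.getD (xs.length - 1 - k) d := by
  rw [List.getD_eq_getElem _ _ (by simpa using hk),
      List.getD_eq_getElem _ _ (by omega)]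
  exact List.getElem_reverse _

theorem pvNR_eq_some (xs : List String) (p i : Nat) (hp : p < xs.length)
    (hip : p ≤ i) (hi' : i < xs.length) (hi : xs.getD i "" ≠ "NA")
    (hNA : ∀ k, p ≤ k → k < i → xs.getD k "" = "NA") :
    pvNR xs p = some (xs.getD i "", i - p) := by
  unfold pvNR
  have h := pvScan_getD_last xs.reverse none (xs.length - 1 - p) (xs.length - 1 - i)
    (by simp; omega) (by omega)
    (by rw [getD_reverse _ "" _ (by omega),
            show xs.length - 1 - (xs.length - 1 - i) = i by omega]; exact hi)
    (fun k h1 h2 => by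
      rw [getD_reverse _ "" _ (by omega)]
      exact hNA (xs.length - 1 - k) (by omega) (by omega))
  rw [h, getD_reverse _ "" _ (by omega),
      show xs.length - 1 - (xs.length - 1 - i) = i by omega]
  exact congrArg some (Prod.ext rfl (by omega))

theorem pvNR_eq_none (xs : List String) (p : Nat) (hp : p < xs.length)
    (hNA : ∀ k, p ≤ k → k < xs.length → xs.getD k "" = "NA") :
    pvNR xs p = none := by
  unfold pvNR
  have h := pvScan_getD_allNA xs.reverse none (xs.length - 1 - p)
    (by simp; omega)
    (fun k hk => by
      rw [getD_reverse _ "" _ (by omega)]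
      exact hNA (xs.length - 1 - k) (by omega) (by omega))
  rw [h]

-- S1: at a data point the spec is the data
theorem pvSpec_data (xs : List String) (p : Nat) (h : xs.getD p "" ≠ "NA") :
    pvSpec xs p = xs.getD p "" := by
  unfold pvSpec; rw [if_pos h]

-- S2: before the first data point
theorem pvSpec_leading (xs : List String) (i0 p : Nat) (hi0 : i0 < xs.length)
    (hNA : ∀ k, k < i0 → xs.getD k "" = "NA") (hd : xs.getD i0 "" ≠ "NA") (hp : p < i0) :
    pvSpec xs p = xs.getD i0 "" := by
  have hv : xs.getD p "" = "NA" := hNA p hp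
  have hnl : pvNL xs p = none :=
    pvScan_getD_allNA xs none p (by omega) (fun k hk => hNA k (by omega))
  have hnr := pvNR_eq_some xs p i0 (by omega) (by omega) hi0 hd (fun k h1 h2 => hNA k h2)
  unfold pvSpec
  rw [if_neg (by simpa using hv), hnl, hnr]

-- S3: strictly inside a gap between data points i < j
theorem pvSpec_gap (xs : List String) (i j p : Nat) (hj : j < xs.length)
    (hi : xs.getD i "" ≠ "NA") (hjd : xs.getD j "" ≠ "NA")
    (hNA : ∀ k, i < k → k < j → xs.getD k "" = "NA") (h1 : i < p) (h2 : p < j) :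
    pvSpec xs p = if p < (i + j + 1) / 2 then xs.getD i "" else xs.getD j "" := by
  have hv : xs.getD p "" = "NA" := hNA p h1 h2
  have hnl : pvNL xs p = some (xs.getD i "", p - i) :=
    pvScan_getD_last xs none p i (by omega) (by omega) hi
      (fun k a b => hNA k a (by omega))
  have hnr := pvNR_eq_some xs p j (by omega) (by omega) hj hjd
    (fun k a b => hNA k (by omega) b)
  have hiff : (p < (i + j + 1) / 2) ↔ (p - i < j - p) := by omega
  unfold pvSpec
  rw [if_neg (by simpa using hv), hnl, hnr, if_congr hiff rfl rfl]

-- S4: after the last data point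
theorem pvSpec_trailing (xs : List String) (i p : Nat) (hp : p < xs.length)
    (hi : xs.getD i "" ≠ "NA") (hNA : ∀ k, i < k → k < xs.length → xs.getD k "" = "NA")
    (h1 : i < p) :
    pvSpec xs p = xs.getD i "" := by
  have hv : xs.getD p "" = "NA" := hNA p h1 hp
  have hnl : pvNL xs p = some (xs.getD i "", p - i) :=
    pvScan_getD_last xs none p i hp (by omega) hi
      (fun k a b => hNA k a (by omega))
  have hnr := pvNR_eq_none xs p hp (fun k a b => hNA k (by omega) b)
  unfold pvSpec
  rw [if_neg (by simpa using hv), hnl, hnr]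

theorem pvSpec_allNA (xs : List String) (p : Nat)
    (hNA : ∀ k, k < xs.length → xs.getD k "" = "NA") :
    pvSpec xs p = xs.getD p "" := by
  by_cases hp : p < xs.length
  · have hv : xs.getD p "" = "NA" := hNA p hp
    have hnl : pvNL xs p = none :=
      pvScan_getD_allNA xs none p hp (fun k hk => hNA k (by omega))
    have hnr := pvNR_eq_none xs p hp (fun k a b => hNA k b)
    unfold pvSpec
    rw [if_neg (by simpa using hv), hnl, hnr]
  · have hv : xs.getD p "" = "" := List.getD_eq_default _ _ (by omega)
    unfold pvSpec
    rw [if_pos (by rw [hv]; simp)]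

theorem getD_setSeg (xs : List String) (a b : Nat) (v : String) (k : Nat)
    (hk : k < xs.length) :
    (pvSetSeg xs a b v).getD k "" = if a ≤ k ∧ k < b then v else xs.getD k "" := by
  rw [List.getD_eq_getElem _ _ (by simpa [pvSetSeg_length] using hk),
      List.getD_eq_getElem _ _ hk]
  simp [pvSetSeg, List.getElem_mapIdx]

theorem pvInnerJ_le (data : List String) (j : Nat) (h : j ≤ data.length - 1) :
    pvInnerJ data j ≤ data.length - 1 := by
  fun_induction pvInnerJ data j with
  | case1 j h1 h2 => omega
  | case2 j h1 h2 ih => exact ih (by omega)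
  | case3 j h1 => omega

theorem pvInnerJ_gap (data : List String) (j : Nat) :
    ∀ k, j ≤ k → k < pvInnerJ data j → data.getD k "" = "NA" := by
  fun_induction pvInnerJ data j with
  | case1 j h1 h2 => intro k hk1 hk2; omega
  | case2 j h1 h2 ih =>
    intro k hk1 hk2
    rcases Nat.eq_or_lt_of_le hk1 with rfl | hlt
    · simpa using h2
    · exact ih k hlt hk2
  | case3 j h1 => intro k hk1 hk2; omega

theorem pvInnerJ_data (data : List String) (j : Nat)
    (h : pvInnerJ data j < data.length - 1) :
    data.getD (pvInnerJ data j) "" ≠ "NA" := by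
  fun_induction pvInnerJ data j with
  | case1 j h1 h2 => exact h2
  | case2 j h1 h2 ih => exact ih h
  | case3 j h1 => omega

-- main loop invariant lemma
theorem pvLoopA_spec (m : Nat) : ∀ (orig data : List String) (i : Nat),
    orig.length - i ≤ m →
    data.length = orig.length → i < orig.length → orig.getD i "" ≠ "NA" →
    (∀ k, k ≤ i → data.getD k "" = pvSpec orig k) →
    (∀ k, i < k → k < orig.length → data.getD k "" = orig.getD k "") →
    pvLoopA data i = pvSpecList orig := by
  induction m with
  | zero => intro orig data i h0 hlen hi _ _ _; omega
  | succ m ih =>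
    intro orig data i hm hlen hi hanchor hpre hpost
    by_cases hcond : i < data.length - 1
    case neg =>
      rw [pvLoopA, if_neg hcond]
      apply List.ext_getElem (by simp [pvSpecList, hlen])
      intro k hk1 hk2
      have hk : k < orig.length := by omega
      have h3 : data.getD k "" = pvSpec orig k := hpre k (by omega)
      rw [List.getD_eq_getElem _ _ hk1] at h3
      rw [h3]
      simp [pvSpecList]
    case pos =>
      rw [pvLoopA, if_pos hcond]
      simp only []
      set j := pvInnerJ data (i + 1) with hjdef
      have hjge : i + 1 ≤ j := pvInnerJ_ge data (i + 1)
      have hjle : j ≤ data.length - 1 := pvInnerJ_le data (i + 1) (by omega)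
      have hgapD : ∀ k, i + 1 ≤ k → k < j → data.getD k "" = "NA" := pvInnerJ_gap data (i + 1)
      have hgap : ∀ k, i < k → k < j → orig.getD k "" = "NA" := fun k a b => by
        rw [← hpost k a (by omega)]; exact hgapD k (by omega) b
      have hdi : data.getD i "" = orig.getD i "" := by
        rw [hpre i le_rfl, pvSpec_data orig i hanchor]
      set mid := (i + j + 1) / 2 with hmiddef
      have hmid1 : i + 1 ≤ mid := by omega
      have hmid2 : mid ≤ j := by omega
      set d1 := pvSetSeg data (i + 1) mid (data.getD i "") with hd1def
      have hd1len : d1.length = orig.length := by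
        rw [hd1def, pvSetSeg_length, hlen]
      have hd1get : ∀ k, k < orig.length →
          d1.getD k "" = if i + 1 ≤ k ∧ k < mid then orig.getD i "" else data.getD k "" := by
        intro k hk
        rw [hd1def, getD_setSeg data _ _ _ k (by omega), hdi]
      have hd1j : d1.getD j "" = orig.getD j "" := by
        rw [hd1get j (by omega), if_neg (by omega)]
        exact hpost j (by omega) (by omega)
      by_cases hjNA : d1.getD j "" ≠ "NA"
      · rw [if_pos hjNA]
        have hojNA : orig.getD j "" ≠ "NA" := by rw [← hd1j]; exact hjNA
        apply ih orig _ j (by omega) (by rw [pvSetSeg_length, hd1len]) (by omega) hojNA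
        · intro k hk
          have hk' : k < orig.length := by omega
          rw [getD_setSeg d1 _ _ _ k (by omega), hd1j]
          rcases Nat.lt_or_ge k (i + 1) with hki | hki
          · rw [if_neg (by omega), hd1get k hk', if_neg (by omega)]
            exact hpre k (by omega)
          · rcases Nat.lt_or_ge k mid with hkm | hkm
            · rw [if_neg (by omega), hd1get k hk', if_pos (by omega)]
              rw [pvSpec_gap orig i j k (by omega) hanchor hojNA hgap (by omega) (by omega)]
              rw [if_pos (by omega)]
            · rcases Nat.lt_or_ge k j with hkj | hkj
              · rw [if_pos (by omega)]
                rw [pvSpec_gap orig i j k (by omega) hanchor hojNA hgap (by omega) (by omega)]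
                rw [if_neg (by omega)]
              · have hkj' : k = j := by omega
                subst hkj'
                rw [if_neg (by omega), hd1j, pvSpec_data orig j hojNA]
        · intro k a b
          rw [getD_setSeg d1 _ _ _ k (by omega), if_neg (by omega),
              hd1get k b, if_neg (by omega)]
          exact hpost k (by omega) b
      · rw [if_neg hjNA]
        have hojNA : orig.getD j "" = "NA" := by
          rw [← hd1j]; simpa using hjNA
        have hjend : j = data.length - 1 := by
          by_contra h
          have h2 := pvInnerJ_data data (i + 1) (by omega)
          rw [← hjdef] at h2
          apply h2
          rw [hpost j (by omega) (by omega), hojNA]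
        have htrail : ∀ k, i < k → k < orig.length → orig.getD k "" = "NA" := by
          intro k a b
          rcases Nat.lt_or_ge k j with hkj | hkj
          · exact hgap k a hkj
          · have : k = j := by omega
            subst this; exact hojNA
        have hd1i : d1.getD i "" = orig.getD i "" := by
          rw [hd1get i (by omega), if_neg (by omega)]
          exact hdi
        rw [pvLoopA, if_neg (by rw [pvSetSeg_length, hd1len]; omega)]
        apply List.ext_getElem (by simp [pvSpecList, pvSetSeg_length, hd1len])
        intro k hk1 hk2
        have hk : k < orig.length := by
          have := pvSetSeg_length d1 mid (j + 1) (d1.getD i "")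
          omega
        have goal3 : (pvSetSeg d1 mid (j + 1) (d1.getD i "")).getD k "" = pvSpec orig k := by
          rw [getD_setSeg d1 _ _ _ k (by omega), hd1i]
          rcases Nat.lt_or_ge k (i + 1) with hki | hki
          · rw [if_neg (by omega), hd1get k hk, if_neg (by omega)]
            exact hpre k (by omega)
          · rcases Nat.lt_or_ge k mid with hkm | hkm
            · rw [if_neg (by omega), hd1get k hk, if_pos (by omega)]
              rw [pvSpec_trailing orig i k hk hanchor htrail (by omega)]
            · have hkj : k ≤ j := by omega
              rw [if_pos (by omega)]
              rw [pvSpec_trailing orig i k hk hanchor htrail (by omega)]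
        rw [List.getD_eq_getElem _ _ hk1] at goal3
        rw [goal3]
        simp [pvSpecList]

theorem A_spec (xs : List String) : NN_interpolate xs = pvSpecList xs := by
  unfold NN_interpolate
  cases h : xs.findIdx? (fun s => s != "NA") with
  | none =>
    show xs = pvSpecList xs
    have hNA : ∀ k, k < xs.length → xs.getD k "" = "NA" := by
      intro k hk
      have h2 := List.findIdx?_eq_none_iff.mp h (xs[k]) (by simp)
      rw [List.getD_eq_getElem _ _ hk]
      simpa using h2
    apply List.ext_getElem (by simp [pvSpecList])
    intro k hk1 hk2
    have h3 := (pvSpec_allNA xs k hNA).symm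
    rw [List.getD_eq_getElem _ _ hk1] at h3
    rw [h3]
    simp [pvSpecList]
  | some i =>
    show pvLoopA (pvSetSeg xs 0 i (xs.getD i "")) i = pvSpecList xs
    obtain ⟨hi, hdi, hprev⟩ := List.findIdx?_eq_some_iff_getElem.mp h
    have hdi' : xs.getD i "" ≠ "NA" := by
      rw [List.getD_eq_getElem _ _ hi]; simpa using hdi
    have hprev' : ∀ k, k < i → xs.getD k "" = "NA" := by
      intro k hk
      have := hprev k hk
      rw [List.getD_eq_getElem _ _ (by omega)]
      simpa using this
    apply pvLoopA_spec xs.length xs _ i (by omega) (by rw [pvSetSeg_length]) hi hdi'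
    · intro k hk
      rw [getD_setSeg xs _ _ _ k (by omega)]
      rcases Nat.lt_or_ge k i with hki | hki
      · rw [if_pos (by omega), pvSpec_leading xs i k hi hprev' hdi' hki]
      · have : k = i := by omega
        subst this
        rw [if_neg (by omega), pvSpec_data xs k hdi']
    · intro k a b
      rw [getD_setSeg xs _ _ _ k (by omega), if_neg (by omega)]

theorem B_spec (xs : List String) : NN_interpolate_alt xs = pvSpecList xs := by
  apply List.ext_getElem (by simp [NN_interpolate_alt, pvSpecList, pvScan_length])
  intro p h1 h2
  have hp : p < xs.length := by
    simpa [NN_interpolate_alt, pvScan_length] using h1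
  have hL : (pvScan xs none)[p]'(by rw [pvScan_length]; exact hp) = pvNL xs p :=
    (List.getD_eq_getElem _ _ _).symm
  have hR : ((pvScan xs.reverse none).reverse)[p]'(by simp [pvScan_length]; exact hp)
      = pvNR xs p := by
    have h5 : ((pvScan xs.reverse none).reverse).getD p none = pvNR xs p := by
      rw [getD_reverse _ none p (by simp [pvScan_length]; exact hp)]
      rw [pvScan_length, List.length_reverse]
      rfl
    exact (List.getD_eq_getElem _ _ _).symm.trans h5
  simp only [NN_interpolate_alt, List.getElem_map, List.getElem_zip, pvSpecList,
    List.getElem_range]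
  rw [hL, hR]
  unfold pvSpec
  rw [List.getD_eq_getElem _ _ hp]

-- ===== VERDICT (by name: the statement is the Claim_ definition above) =====
theorem NN_interpolate_spec : Claim_equal_NN_interpolate := by
  intro xs _
  unfold Spec_NN_interpolate
  rw [A_spec, B_spec]
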